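-- pv_equiv track=rewrite | github.com/WestbrookYuan/NowCoder | HUAWEI/HJ96.py | shownumbers
-- ===== SOURCE A (Python) =====
-- def shownumbers(string: str):
--     shows = []
--     i = 0
--     while i < len(string):
--         if string[i].isdigit():
--             shows.append("*")
--             for j in range(i, len(string)):
--                 if string[j].isdigit():
--                     shows.append(string[j])
--                 else:
--                     shows.append("*")
--                     shows.append(string[j])
--                     i = j
--                     break
--                 if j == (len(string) - 1):
--                     shows.append("*")
--                     return "".join(shows)
--         else:
--             shows.append(string[i])
--         i += 1
--     return "".join(shows)
-- ===== SOURCE B (Python) =====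
-- def shownumbers(string: str):
--     # group-first decomposition: split into maximal same-class runs, wrap digit runs
--     out = []
--     pos = 0
--     n = len(string)
--     while pos < n:
--         is_d = string[pos].isdigit()
--         end = pos + 1
--         while end < n and string[end].isdigit() == is_d:
--             end += 1
--         run = string[pos:end]
--         out.append('*' + run + '*' if is_d else run)
--         pos = end
--     return ''.join(out)
-- ===== Notes on version B (the rewrite author's own statement) =====
-- stated objective: simpler
-- what changed: Replaced A's nested scan-ahead loop with index jumps, break and a mid-loop early return by a flat run-grouping loop: find each maximal same-class run, wrap it if it is digits, append it, advance past it.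
import Mathlib
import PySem

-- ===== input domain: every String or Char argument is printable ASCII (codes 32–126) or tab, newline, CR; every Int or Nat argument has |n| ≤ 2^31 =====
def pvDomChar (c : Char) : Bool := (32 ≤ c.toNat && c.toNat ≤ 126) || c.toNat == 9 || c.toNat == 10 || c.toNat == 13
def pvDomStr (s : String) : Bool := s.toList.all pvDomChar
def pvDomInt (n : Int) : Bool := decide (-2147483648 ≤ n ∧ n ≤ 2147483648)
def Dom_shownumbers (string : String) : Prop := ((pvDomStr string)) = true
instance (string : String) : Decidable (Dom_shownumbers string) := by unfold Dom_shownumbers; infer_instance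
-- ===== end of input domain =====

-- B wraps digit runs by grouping maximal same-class runs in one flat loop, instead of A's
-- nested scan-ahead loop with index jumps, break and a mid-loop early return (objective: simpler).

-- ===== PORT A =====
-- inner 'for j in range(i, len(string))' loop of A: either returns early (Sum.inr, the
-- 'if j == len(string)-1: return' path) or falls through to the outer loop with (shows, i)
-- (Sum.inl). fuel only makes the recursion structural; it is called with fuel = len - j,
-- the exact number of remaining iterations, so fuel never runs out before the range does.
def shownumbersInner (cs : List Char) : Nat → Nat → List Char → (List Char × Nat) ⊕ List Char
  | 0, j, acc => Sum.inl (acc, j)          -- range exhausted without break (unreachable in A)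
  | fuel + 1, j, acc =>
    if h : j < cs.length then
      if PySem.Chars.isdigit cs[j] then
        let acc' := acc ++ [cs[j]]
        if j = cs.length - 1 then Sum.inr (acc' ++ ['*'])
        else shownumbersInner cs fuel (j + 1) acc'
      else Sum.inl (acc ++ ['*', cs[j]], j)   -- append '*', append string[j], i = j, break
    else Sum.inl (acc, j)

-- outer 'while i < len(string)' loop of A; fuel = len - i bounds the remaining iterations
-- (i strictly increases), so the fuel-0 case is only reached with i ≥ len, where A also stops
def shownumbersLoop (cs : List Char) : Nat → Nat → List Char → List Char
  | 0, _, acc => acc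
  | fuel + 1, i, acc =>
    if h : i < cs.length then
      if PySem.Chars.isdigit cs[i] then
        match shownumbersInner cs (cs.length - i) i (acc ++ ['*']) with
        | Sum.inr res => res
        | Sum.inl (acc', i') => shownumbersLoop cs fuel (i' + 1) acc'
      else shownumbersLoop cs fuel (i + 1) (acc ++ [cs[i]])
    else acc

def shownumbers (string : String) : String :=
  String.ofList (shownumbersLoop string.toList string.toList.length 0 [])

-- ===== PORT B =====
-- one iteration of B's outer loop per maximal run: the inner 'while end < n and
-- string[end].isdigit() == is_d' scan is the takeWhile, advancing pos past the run is the
-- dropWhile; fuel = number of characters left bounds the iterations (each run is nonempty)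
def shownumbersRuns (cs : List Char) : Nat → List Char → List (List Char)
  | _, [] => []
  | 0, _ :: _ => []                        -- unreachable: fuel ≥ length of the rest
  | fuel + 1, c :: rest =>
    let k := PySem.Chars.isdigit c
    let run := c :: rest.takeWhile (fun x => PySem.Chars.isdigit x == k)
    (if k then '*' :: run ++ ['*'] else run)
      :: shownumbersRuns cs fuel (rest.dropWhile (fun x => PySem.Chars.isdigit x == k))

def shownumbers_alt (string : String) : String :=
  String.ofList (shownumbersRuns string.toList string.toList.length string.toList).flatten

-- ===== PRECONDITION & SPEC =====
def Spec_shownumbers (string : String) (out : String) : Prop := out = shownumbers_alt string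
instance (string : String) (out : String) : Decidable (Spec_shownumbers string out) := by unfold Spec_shownumbers; infer_instance

-- ===== CLAIM (what is proved, stated in full; the proofs are below) =====
def Claim_equal_shownumbers : Prop := ∀ (string : String), Dom_shownumbers string → Spec_shownumbers string (shownumbers string)

-- ===== LEMMAS AND PROOFS =====

-- canonical form both ports are reduced to: wrap each maximal digit run in '*'
def wrapRuns : List Char → List Char
  | [] => []
  | c :: rest =>
    if PySem.Chars.isdigit c then
      '*' :: (c :: rest.takeWhile PySem.Chars.isdigit) ++
        '*' :: wrapRuns (rest.dropWhile PySem.Chars.isdigit)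
    else c :: wrapRuns rest
termination_by cs => cs.length
decreasing_by
  · simpa using Nat.lt_succ_of_le (List.length_dropWhile_le _ _)
  · simp

theorem drop_takeWhile_length {α : Type} (p : α → Bool) :
    ∀ l : List α, l.drop (l.takeWhile p).length = l.dropWhile p := by
  intro l
  induction l with
  | nil => simp
  | cons a t ih =>
    by_cases h : p a
    · simp [h, ih]
    · simp [h]

theorem inner_spec (cs : List Char) :
    ∀ fuel j acc, cs.length - j ≤ fuel → j < cs.length →
      shownumbersInner cs fuel j acc =
        match (cs.drop j).dropWhile PySem.Chars.isdigit with
        | [] => Sum.inr (acc ++ (cs.drop j).takeWhile PySem.Chars.isdigit ++ ['*'])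
        | d :: _ => Sum.inl (acc ++ (cs.drop j).takeWhile PySem.Chars.isdigit ++ ['*', d],
            j + ((cs.drop j).takeWhile PySem.Chars.isdigit).length) := by
  intro fuel
  induction fuel with
  | zero => intro j acc hn hj; omega
  | succ n ih =>
    intro j acc hn hj
    have hdrop : cs.drop j = cs[j] :: cs.drop (j + 1) := List.drop_eq_getElem_cons hj
    rw [shownumbersInner]
    by_cases hd : PySem.Chars.isdigit cs[j]
    · by_cases hlast : j = cs.length - 1
      · have h1 : cs.drop (j + 1) = [] := List.drop_eq_nil_of_le (by omega)
        rw [hdrop, h1]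
        simp only [List.dropWhile_cons, List.takeWhile_cons, hd, if_true,
          List.dropWhile_nil, List.takeWhile_nil, hj, dite_true, if_pos hlast]
      · have hj1 : j + 1 < cs.length := by omega
        rw [hdrop]
        simp only [hj, hd, hlast, dite_true, if_true, if_false,
          List.takeWhile_cons, List.dropWhile_cons]
        rw [ih (j + 1) (acc ++ [cs[j]]) (by omega) hj1]
        cases hrest : (cs.drop (j + 1)).dropWhile PySem.Chars.isdigit with
        | nil => simp
        | cons d r => simp; omega
    · rw [hdrop]
      simp only [List.dropWhile_cons, List.takeWhile_cons, hd, if_false, Bool.false_eq_true,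
        hj, dite_true]
      simp

theorem loop_eq_of_inr (cs : List Char) (fuel i : Nat) (acc res : List Char)
    (hi : i < cs.length) (hd : PySem.Chars.isdigit cs[i])
    (h : shownumbersInner cs (cs.length - i) i (acc ++ ['*']) = Sum.inr res) :
    shownumbersLoop cs (fuel + 1) i acc = res := by
  rw [shownumbersLoop]
  simp only [hi, hd, dite_true, if_true]
  split
  · rename_i res' heq; rw [h] at heq; injection heq with h2; rw [h2]
  · rename_i acc' i' heq; rw [h] at heq; exact absurd heq (by simp)

theorem loop_eq_of_inl (cs : List Char) (fuel i : Nat) (acc acc' : List Char) (i' : Nat)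
    (hi : i < cs.length) (hd : PySem.Chars.isdigit cs[i])
    (h : shownumbersInner cs (cs.length - i) i (acc ++ ['*']) = Sum.inl (acc', i')) :
    shownumbersLoop cs (fuel + 1) i acc = shownumbersLoop cs fuel (i' + 1) acc' := by
  rw [shownumbersLoop]
  simp only [hi, hd, dite_true, if_true]
  split
  · rename_i res' heq; rw [h] at heq; exact absurd heq (by simp)
  · rename_i a b heq; rw [h] at heq
    injection heq with h2
    rw [show a = acc' from congrArg Prod.fst h2.symm, show b = i' from congrArg Prod.snd h2.symm]

theorem loop_spec (cs : List Char) :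
    ∀ fuel i acc, cs.length - i ≤ fuel → shownumbersLoop cs fuel i acc = acc ++ wrapRuns (cs.drop i) := by
  intro fuel
  induction fuel with
  | zero =>
    intro i acc hn
    rw [shownumbersLoop, List.drop_eq_nil_of_le (by omega : cs.length ≤ i), wrapRuns]
    simp
  | succ n ih =>
    intro i acc hn
    by_cases hi : i < cs.length
    · have hdrop : cs.drop i = cs[i] :: cs.drop (i + 1) := List.drop_eq_getElem_cons hi
      by_cases hd : PySem.Chars.isdigit cs[i]
      · have hin := inner_spec cs (cs.length - i) i (acc ++ ['*']) (Nat.le_refl _) hi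
        rw [hdrop] at hin
        simp only [List.takeWhile_cons, List.dropWhile_cons, hd, if_true] at hin
        rw [hdrop, wrapRuns]
        simp only [hd, if_true]
        cases hrest : (cs.drop (i + 1)).dropWhile PySem.Chars.isdigit with
        | nil =>
          rw [hrest] at hin
          rw [loop_eq_of_inr cs n i acc _ hi hd hin, wrapRuns]
          simp
        | cons d r =>
          rw [hrest] at hin
          rw [loop_eq_of_inl cs n i acc _ _ hi hd hin,
            ih _ _ (by have := List.length_dropWhile_le PySem.Chars.isdigit (cs.drop (i + 1)); rw [hrest] at this; simp at this; omega)]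
          have h2 : cs.drop (i + 1 + ((cs.drop (i + 1)).takeWhile PySem.Chars.isdigit).length) = d :: r := by
            have h := drop_takeWhile_length PySem.Chars.isdigit (cs.drop (i + 1))
            rw [hrest, List.drop_drop] at h
            exact h
          have hsuf : cs.drop (i + (((cs.drop (i + 1)).takeWhile PySem.Chars.isdigit).length + 1) + 1) = r := by
            have h5 := congrArg (List.drop 1) h2
            rw [List.drop_drop] at h5
            simp only [List.drop_succ_cons, List.drop_zero] at h5
            rw [show i + (((cs.drop (i + 1)).takeWhile PySem.Chars.isdigit).length + 1) + 1
                = i + 1 + ((cs.drop (i + 1)).takeWhile PySem.Chars.isdigit).length + 1 from by omega]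
            exact h5
          simp only [List.length_cons]
          rw [hsuf]
          have hnd : PySem.Chars.isdigit d = false := by
            have := List.head?_dropWhile_not PySem.Chars.isdigit (cs.drop (i + 1))
            rw [hrest] at this; simpa using this
          rw [wrapRuns]
          simp [hnd]
      · rw [shownumbersLoop]
        simp only [hi, hd, dite_true, if_false, Bool.false_eq_true]
        rw [ih (i + 1) (acc ++ [cs[i]]) (by omega), hdrop, wrapRuns]
        simp [hd]
    · rw [shownumbersLoop, List.drop_eq_nil_of_le (by omega : cs.length ≤ i)]
      simp [hi, wrapRuns]

theorem wrap_nondigit_prefix (l : List Char) :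
    wrapRuns l = l.takeWhile (fun x => !PySem.Chars.isdigit x) ++
      wrapRuns (l.dropWhile (fun x => !PySem.Chars.isdigit x)) := by
  induction l with
  | nil => simp
  | cons c rest ih =>
    by_cases hd : PySem.Chars.isdigit c
    · simp [hd]
    · rw [wrapRuns]
      simp only [List.takeWhile_cons, List.dropWhile_cons, hd]
      simp [ih]

theorem runs_spec (cs : List Char) :
    ∀ fuel (l : List Char), l.length ≤ fuel → (shownumbersRuns cs fuel l).flatten = wrapRuns l := by
  intro fuel
  induction fuel with
  | zero =>
    intro l hn
    have : l = [] := List.eq_nil_of_length_eq_zero (by omega)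
    subst this; rw [shownumbersRuns, wrapRuns]; rfl
  | succ n ih =>
    intro l hn
    cases l with
    | nil => rw [shownumbersRuns, wrapRuns]; rfl
    | cons c rest =>
      rw [shownumbersRuns]
      by_cases hd : PySem.Chars.isdigit c
      · rw [wrapRuns]
        simp only [hd, if_true]
        rw [List.flatten_cons,
          ih _ (Nat.le_trans (List.length_dropWhile_le _ _) (by simpa using hn))]
        simp
      · rw [wrap_nondigit_prefix (c :: rest)]
        simp only [hd, Bool.not_false, List.takeWhile_cons, List.dropWhile_cons]
        rw [List.flatten_cons,
          ih _ (Nat.le_trans (List.length_dropWhile_le _ _) (by simpa using hn))]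
        simp

-- ===== VERDICT (by name: the statement is the Claim_ definition above) =====
theorem shownumbers_spec : Claim_equal_shownumbers := by
  intro s _
  unfold Spec_shownumbers shownumbers shownumbers_alt
  rw [runs_spec s.toList s.toList.length s.toList (Nat.le_refl _),
    loop_spec s.toList s.toList.length 0 [] (by omega)]
  simp
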